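-- pv_equiv track=rewrite | github.com/mwenvinicius/Algoritmos | Greedy-Algorithms/Huffman.py | Taxa
-- ===== SOURCE A (Python) =====
-- def Taxa(Texto,Codigo):
-- 	Tamanho = len(Texto)
-- 	Quantidade = len(Codigo)
-- 	p = 0
-- 	escolhido = 0
-- 	while escolhido == 0:
-- 		if pow(2,p) >= Quantidade:
-- 			escolhido = p
-- 		p += 1
-- 	Bits = escolhido * Tamanho
-- 	return Bits
-- ===== SOURCE B (Python) =====
-- def Taxa(Texto, Codigo):
--     # closed form: smallest positive p with 2**p >= len(Codigo) is
--     # max(1, (len(Codigo)-1).bit_length()); multiply by text length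
--     return max(1, (len(Codigo) - 1).bit_length()) * len(Texto)
-- ===== Notes on version B (the rewrite author's own statement) =====
-- stated objective: simpler
-- what changed: Replaces the while-loop search for the smallest positive p with 2^p >= len(Codigo) by the loop-free closed form max(1, (len(Codigo)-1).bit_length()).
import Mathlib
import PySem

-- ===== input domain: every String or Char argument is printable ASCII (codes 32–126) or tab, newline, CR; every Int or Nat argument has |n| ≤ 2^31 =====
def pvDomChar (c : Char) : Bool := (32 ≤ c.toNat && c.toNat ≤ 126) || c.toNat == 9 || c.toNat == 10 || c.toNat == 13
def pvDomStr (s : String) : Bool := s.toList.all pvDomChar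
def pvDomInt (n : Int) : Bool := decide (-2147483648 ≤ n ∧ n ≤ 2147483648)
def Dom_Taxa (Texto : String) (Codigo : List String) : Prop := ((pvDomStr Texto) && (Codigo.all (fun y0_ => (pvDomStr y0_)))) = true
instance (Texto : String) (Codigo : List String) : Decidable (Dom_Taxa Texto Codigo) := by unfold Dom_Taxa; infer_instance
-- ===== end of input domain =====

-- B replaces A's while-loop search for the smallest positive p with 2^p >= len(Codigo)
-- by the closed form max(1, (len(Codigo)-1).bit_length()); objective: simpler (loop-free closed form).

-- ===== PORT A =====
-- A's while loop: escolhido stays 0 exactly while either 2^p < Quantidade or the only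
-- p satisfying it so far was p = 0 (escolhido := 0 keeps the loop running).  The fuel
-- argument only makes the recursion structural; Quantidade + 2 is proved sufficient below.
def taxaLoop (Q : Int) (fuel : Nat) (p : Nat) : Int :=
  match fuel with
  | 0 => (p : Int)          -- never reached with the fuel Taxa supplies
  | fuel + 1 =>
    if Q ≤ 2 ^ p then
      if p = 0 then taxaLoop Q fuel (p + 1)   -- escolhido := 0, loop condition still true
      else (p : Int)
    else taxaLoop Q fuel (p + 1)

def Taxa (Texto : String) (Codigo : List String) : Int :=
  let Tamanho : Int := PySem.Str.len Texto
  let Quantidade : Int := Codigo.length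
  let escolhido := taxaLoop Quantidade (Codigo.length + 2) 0
  escolhido * Tamanho

-- ===== PORT B =====
-- bit_length() of an int is the bit size of its absolute value: Nat.size ∘ Int.natAbs.
def Taxa_alt (Texto : String) (Codigo : List String) : Int :=
  let Quantidade : Int := Codigo.length
  (max 1 ((((Quantidade - 1).natAbs.size : Nat)) : Int)) * PySem.Str.len Texto

-- ===== PRECONDITION & SPEC =====
def Spec_Taxa (Texto : String) (Codigo : List String) (out : Int) : Prop := out = Taxa_alt Texto Codigo
instance (Texto : String) (Codigo : List String) (out : Int) : Decidable (Spec_Taxa Texto Codigo out) := by unfold Spec_Taxa; infer_instance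

-- ===== CLAIM (what is proved, stated in full; the proofs are below) =====
def Claim_equal_Taxa : Prop := ∀ (Texto : String) (Codigo : List String), Dom_Taxa Texto Codigo → Spec_Taxa Texto Codigo (Taxa Texto Codigo)

-- ===== LEMMAS AND PROOFS =====

-- the target value of the loop, for Quantidade = n
def taxaM (n : Nat) : Nat := max 1 (((n : Int) - 1).natAbs.size)

theorem taxaM_pos (n : Nat) : 1 ≤ taxaM n := le_max_left _ _

theorem taxaM_le (n : Nat) : taxaM n ≤ n + 1 := by
  unfold taxaM
  rcases Nat.eq_zero_or_pos n with h0 | h0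
  · subst h0; decide
  · have habs : ((n : Int) - 1).natAbs = n - 1 := by omega
    rw [habs]
    have : (n - 1).size ≤ n := Nat.size_le.mpr (by have := Nat.lt_two_pow_self (n := n); omega)
    omega

-- for positive p, the loop's test 2^p >= n is equivalent to taxaM n <= p
theorem taxa_key (n p : Nat) (hp : 1 ≤ p) : ((n : Int) ≤ 2 ^ p) ↔ taxaM n ≤ p := by
  unfold taxaM
  rcases Nat.eq_zero_or_pos n with h0 | h0
  · subst h0
    simp only [Nat.cast_zero, zero_sub]
    constructor
    · intro _; simpa using hp
    · intro _; positivity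
  · have habs : ((n : Int) - 1).natAbs = n - 1 := by omega
    rw [habs]
    have hcast : ((n : Int) ≤ 2 ^ p) ↔ n ≤ 2 ^ p := by exact_mod_cast Iff.rfl
    rw [hcast, max_le_iff]
    constructor
    · intro h
      refine ⟨hp, Nat.size_le.mpr ?_⟩
      omega
    · intro ⟨_, h⟩
      have := Nat.size_le.mp h
      omega

-- from any p with 1 <= p and p + d = taxaM n, and enough fuel, the loop returns taxaM n
theorem taxa_loop_eq (n : Nat) : ∀ d fuel p, 1 ≤ p → p + d = taxaM n → d < fuel →
    taxaLoop (n : Int) fuel p = (taxaM n : Int) := by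
  intro d
  induction d with
  | zero =>
    intro fuel p hp he hf
    obtain ⟨f, rfl⟩ : ∃ f, fuel = f + 1 := ⟨fuel - 1, by omega⟩
    have hle : taxaM n ≤ p := by omega
    rw [taxaLoop]
    rw [if_pos ((taxa_key n p hp).mpr hle), if_neg (by omega)]
    have : p = taxaM n := by omega
    rw [this]
  | succ d ih =>
    intro fuel p hp he hf
    obtain ⟨f, rfl⟩ : ∃ f, fuel = f + 1 := ⟨fuel - 1, by omega⟩
    have hlt : ¬ taxaM n ≤ p := by omega
    rw [taxaLoop, if_neg (fun h => hlt ((taxa_key n p hp).mp h))]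
    exact ih f (p + 1) (by omega) (by omega) (by omega)

-- the first iteration (p = 0) always continues to p = 1
theorem taxa_loop_start (n : Nat) (f : Nat) : taxaLoop (n : Int) (f + 1) 0 = taxaLoop (n : Int) f 1 := by
  rw [taxaLoop]
  split
  · simp
  · rfl

-- ===== VERDICT (by name: the statement is the Claim_ definition above) =====
theorem Taxa_spec : Claim_equal_Taxa := by
  intro Texto Codigo _
  unfold Spec_Taxa Taxa Taxa_alt
  have h1 := taxa_loop_start Codigo.length (Codigo.length + 1)
  have h2 := taxa_loop_eq Codigo.length (taxaM Codigo.length - 1) (Codigo.length + 1) 1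
      (by omega) (by have := taxaM_pos Codigo.length; omega)
      (by have := taxaM_le Codigo.length; have := taxaM_pos Codigo.length; omega)
  simp only [h1, h2, taxaM]
  push_cast [Nat.cast_max]
  ring
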